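-- pv_equiv track=rewrite | github.com/carlsuburbmates/VIC-Roster | vic-roster-ai/backend/main.py | _build_roster_matrix
-- ===== SOURCE A (Python) =====
-- from typing import Dict, List, Tuple
--
-- DAYS = 14
--
-- SHIFTS = ["AM", "PM", "ND"]
--
-- SHIFT_CODE_MAP = {"AM": "D", "PM": "E", "ND": "N"}
--
-- def _build_roster_matrix(roster: List[Dict], names: List[str]) -> Dict[str, List[str]]:
--     matrix = {name: ["OFF"] * DAYS for name in names}
--     for day_index, day in enumerate(roster):
--         for shift in SHIFTS:
--             code = SHIFT_CODE_MAP[shift]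
--             for name in day[shift]:
--                 matrix.setdefault(name, ["OFF"] * DAYS)
--                 matrix[name][day_index] = code
--     return matrix
-- ===== SOURCE B (Python) =====
-- from typing import Dict, List
--
-- DAYS = 14
--
-- SHIFTS = ["AM", "PM", "ND"]
--
-- SHIFT_CODE_MAP = {"AM": "D", "PM": "E", "ND": "N"}
--
-- def _build_roster_matrix(roster: List[Dict], names: List[str]) -> Dict[str, List[str]]:
--     # Output-oriented: first collect every name (given ones, then any name found in
--     # the roster, in first-appearance order), then build each name's 14-day row.
--     order = dict.fromkeys(names)
--     for day in roster:
--         for shift in SHIFTS: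
--             order.update(dict.fromkeys(day[shift]))
--     result = {}
--     for name in order:
--         row = ["OFF"] * DAYS
--         for day_index, day in enumerate(roster):
--             for shift in SHIFTS:
--                 if name in day[shift]:
--                     row[day_index] = SHIFT_CODE_MAP[shift]
--         result[name] = row
--     return result
-- ===== Notes on version B (the rewrite author's own statement) =====
-- stated objective: alternative
-- what changed: B is output-oriented: it first gathers the full name list (given names plus names discovered in the roster, in first-appearance order via dict.fromkeys/update), then builds each name's 14-day row by scanning the roster per name, instead of A's single input-oriented sweep that mutates rows inside a dict via setdefault.
import Mathlib
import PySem

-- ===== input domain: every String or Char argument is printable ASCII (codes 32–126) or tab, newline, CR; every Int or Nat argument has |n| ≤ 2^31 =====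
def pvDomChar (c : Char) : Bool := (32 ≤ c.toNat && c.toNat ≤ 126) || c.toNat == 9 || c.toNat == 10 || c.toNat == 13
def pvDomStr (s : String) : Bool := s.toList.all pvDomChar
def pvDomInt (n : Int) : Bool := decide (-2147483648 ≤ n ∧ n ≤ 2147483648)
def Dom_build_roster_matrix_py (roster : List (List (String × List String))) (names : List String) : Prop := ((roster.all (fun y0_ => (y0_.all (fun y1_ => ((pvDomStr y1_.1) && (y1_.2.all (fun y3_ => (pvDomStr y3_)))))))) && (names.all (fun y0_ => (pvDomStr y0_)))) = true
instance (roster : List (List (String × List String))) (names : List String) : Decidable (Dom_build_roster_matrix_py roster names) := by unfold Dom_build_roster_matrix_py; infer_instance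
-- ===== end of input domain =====

-- B rebuilds the matrix output-side (gather all names first, then compute each name's
-- 14-day row by scanning the roster per name) instead of A's single dict-mutating sweep;
-- objective: alternative decomposition, same exact result.

-- module constants (shared by both Python files)
def pyDAYS : Nat := 14                                   -- DAYS = 14
def pySHIFTS : List String := ["AM", "PM", "ND"]         -- SHIFTS
def pySHIFT_CODE_MAP : PySem.Dict String String :=
  PySem.Dict.mk [("AM", "D"), ("PM", "E"), ("ND", "N")]  -- SHIFT_CODE_MAP
def pyOffRow : List String := List.replicate pyDAYS "OFF"  -- ["OFF"] * DAYS

-- ===== PORT A =====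
-- day[shift] is ported as (Dict.mk day).getD shift [] — exact when the key is present (Pre_);
-- matrix[name][day_index] = code is pySetD — exact when the index is in range (Pre_).
def build_roster_matrix_py (roster : List (List (String × List String))) (names : List String) : List (String × List String) :=
  let matrix : PySem.Dict String (List String) :=
    names.foldl (fun m name => m.insert name pyOffRow) PySem.Dict.empty
  ((PySem.List.enumerate roster).foldl (fun m p =>
      pySHIFTS.foldl (fun m shift =>
        let code := pySHIFT_CODE_MAP.getD shift ""
        ((PySem.Dict.mk p.2).getD shift []).foldl (fun m name =>
          (m.setdefault name pyOffRow).modify name pyOffRow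
            (fun row => PySem.List.pySetD row p.1 code)) m) m)
    matrix).items

-- ===== PORT B =====
-- order.update(dict.fromkeys(day[shift])) inserts the listed names in order (None values
-- unused): ported as a fold of insert name ().
def build_roster_matrix_py_alt (roster : List (List (String × List String))) (names : List String) : List (String × List String) :=
  let order : PySem.Dict String Unit :=
    roster.foldl (fun od day =>
      pySHIFTS.foldl (fun od shift =>
        ((PySem.Dict.mk day).getD shift []).foldl (fun od name => od.insert name ()) od) od)
      (names.foldl (fun od name => od.insert name ()) PySem.Dict.empty)
  (order.keys.foldl (fun res name =>
      let row :=
        (PySem.List.enumerate roster).foldl (fun row p =>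
          pySHIFTS.foldl (fun row shift =>
            if name ∈ (PySem.Dict.mk p.2).getD shift []
            then PySem.List.pySetD row p.1 (pySHIFT_CODE_MAP.getD shift "")
            else row) row)
          pyOffRow
      res.insert name row)
    (PySem.Dict.empty : PySem.Dict String (List String))).items

-- ===== PRECONDITION & SPEC =====
-- Pre_ excludes exactly the inputs where Python A raises: a day missing one of the keys
-- "AM"/"PM"/"ND" (KeyError) or a name listed on a day with index ≥ 14 (IndexError: rows have
-- DAYS = 14 slots); it also requires each day's keys to be distinct, because an association
-- list with duplicate keys does not represent any Python dict.
def Pre_build_roster_matrix_py (roster : List (List (String × List String))) (names : List String) : Prop :=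
  (∀ day ∈ roster, (day.map Prod.fst).Nodup ∧
      "AM" ∈ day.map Prod.fst ∧ "PM" ∈ day.map Prod.fst ∧ "ND" ∈ day.map Prod.fst) ∧
  (∀ day ∈ roster.drop 14,
      (PySem.Dict.mk day).getD "AM" [] = [] ∧ (PySem.Dict.mk day).getD "PM" [] = [] ∧
      (PySem.Dict.mk day).getD "ND" [] = [])
instance (roster : List (List (String × List String))) (names : List String) : Decidable (Pre_build_roster_matrix_py roster names) := by unfold Pre_build_roster_matrix_py; infer_instance

def pvWitness_build_roster_matrix_py : (List (List (String × List String))) × List String :=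
  ([[("AM", ["ann"]), ("PM", []), ("ND", ["cid"])]], ["bob"])

def Spec_build_roster_matrix_py (roster : List (List (String × List String))) (names : List String) (out : List (String × List String)) : Prop := out = build_roster_matrix_py_alt roster names
instance (roster : List (List (String × List String))) (names : List String) (out : List (String × List String)) : Decidable (Spec_build_roster_matrix_py roster names out) := by unfold Spec_build_roster_matrix_py; infer_instance

-- ===== CLAIM (what is proved, stated in full; the proofs are below) =====
def Claim_equal_build_roster_matrix_py : Prop := ∀ (roster : List (List (String × List String))) (names : List String), Dom_build_roster_matrix_py roster names → Pre_build_roster_matrix_py roster names → Spec_build_roster_matrix_py roster names (build_roster_matrix_py roster names)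

-- ===== LEMMAS AND PROOFS =====

-- the roster flattened into (name, code, day_index) triples, in A's traversal order
def pvSeg (day : List (String × List String)) (s : Int) : List (String × String × Int) :=
  ((PySem.Dict.mk day).getD "AM" []).map (fun n => (n, ("D", s))) ++
  ((PySem.Dict.mk day).getD "PM" []).map (fun n => (n, ("E", s))) ++
  ((PySem.Dict.mk day).getD "ND" []).map (fun n => (n, ("N", s)))

def pvTri : List (List (String × List String)) → Int → List (String × String × Int)
  | [], _ => []
  | d :: r, s => pvSeg d s ++ pvTri r (s + 1)

-- A's innermost mutation, as a step over one triple
def pvStepT (m : PySem.Dict String (List String)) (t : String × String × Int) : PySem.Dict String (List String) :=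
  (m.setdefault t.1 pyOffRow).modify t.1 pyOffRow (fun row => PySem.List.pySetD row t.2.2 t.2.1)

-- B's row update, as a step over one triple (for a fixed name n)
def pvRowStep (n : String) (row : List String) (t : String × String × Int) : List String :=
  if t.1 = n then PySem.List.pySetD row t.2.2 t.2.1 else row

-- names of ts not in seen, first occurrences, in order
def pvNewOf (seen : List String) : List (String × String × Int) → List String
  | [] => []
  | t :: ts => if t.1 ∈ seen then pvNewOf seen ts else t.1 :: pvNewOf (seen ++ [t.1]) ts

lemma pvSetD_idem (xs : List String) (i : Int) (v : String) :
    PySem.List.pySetD (PySem.List.pySetD xs i v) i v = PySem.List.pySetD xs i v := by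
  unfold PySem.List.pySetD PySem.List.pySet?
  cases h : PySem.List.pyIdx? xs.length i with
  | none => simp [h]
  | some k => simp [h, List.length_set, List.set_set]


-- fold of pvRowStep over one mapped segment = membership test
lemma pvN3 (lst : List String) (c : String) (s : Int) (n : String) (row : List String) :
    (lst.map (fun x => (x, (c, s)))).foldl (pvRowStep n) row
      = if n ∈ lst then PySem.List.pySetD row s c else row := by
  induction lst generalizing row with
  | nil => simp
  | cons x rest ih =>
    simp only [List.map_cons, List.foldl_cons, pvRowStep, List.mem_cons]
    by_cases hx : x = n
    · subst hx
      rw [if_pos rfl, ih]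
      by_cases hm : x ∈ rest
      · simp [hm, pvSetD_idem]
      · simp [hm]
    · rw [if_neg hx, ih]
      have heq : (n = x ∨ n ∈ rest) ↔ n ∈ rest :=
        ⟨fun h => h.elim (fun h => absurd h.symm hx) id, Or.inr⟩
      simp [heq]


lemma pvN1 (ts : List (String × String × Int)) (seen : List String) (n : String)
    (h : n ∈ pvNewOf seen ts) : n ∉ seen := by
  induction ts generalizing seen with
  | nil => simp [pvNewOf] at h
  | cons t ts ih =>
    simp only [pvNewOf] at h
    split at h
    · exact ih _ h
    · rcases List.mem_cons.mp h with h | h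
      · subst h; assumption
      · have := ih _ h
        intro hn; exact this (List.mem_append_left _ hn)


lemma pvN2 (ts : List (String × String × Int)) (seen : List String) :
    PySem.Set.update seen (ts.map (·.1)) = seen ++ pvNewOf seen ts := by
  induction ts generalizing seen with
  | nil => simp [pvNewOf, PySem.Set.update]
  | cons t ts ih =>
    simp only [List.map_cons, PySem.Set.update, List.foldl_cons, pvNewOf]
    by_cases h : t.1 ∈ seen
    · rw [if_pos h]
      have hc : PySem.Set.add seen t.1 = seen := by
        simp [PySem.Set.add, h]
      rw [hc]
      exact ih seen
    · rw [if_neg h]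
      have hc : PySem.Set.add seen t.1 = seen ++ [t.1] := by
        simp [PySem.Set.add]
        intro hmem
        exact absurd hmem h
      rw [hc]
      have := ih (seen ++ [t.1])
      simp only [PySem.Set.update] at this ⊢
      rw [this, List.append_assoc]
      simp


-- the main simulation lemma: A's dict fold, itemised
lemma pvL (ts : List (String × String × Int)) (m : PySem.Dict String (List String))
    (hnd : m.keys.Nodup) :
    (ts.foldl pvStepT m).items
      = m.items.map (fun p => (p.1, ts.foldl (pvRowStep p.1) p.2))
        ++ (pvNewOf m.keys ts).map (fun n => (n, ts.foldl (pvRowStep n) pyOffRow)) := by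
  induction ts generalizing m with
  | nil => simp [pvNewOf]
  | cons t ts ih =>
    simp only [List.foldl_cons, pvNewOf]
    by_cases hc : m.contains t.1 = true
    · -- key already present
      have hmem : t.1 ∈ m.keys := (PySem.Dict.contains_iff_mem_keys m t.1).mp hc
      have hstep : pvStepT m t
          = m.insert t.1 (PySem.List.pySetD (m.getD t.1 pyOffRow) t.2.2 t.2.1) := by
        simp [pvStepT, PySem.Dict.setdefault_of_contains m _ hc, PySem.Dict.modify]
      have hitems : (pvStepT m t).items
          = m.items.map (fun p => (p.1, pvRowStep p.1 p.2 t)) := by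
        rw [hstep, PySem.Dict.items_insert_of_contains m _ hc]
        apply List.map_congr_left
        intro p hp
        obtain ⟨k, v⟩ := p
        by_cases hpk : k = t.1
        · subst hpk
          have hval : m.getD t.1 pyOffRow = v := PySem.Dict.getD_of_mem_items m hp hnd _
          simp [pvRowStep, hval]
        · have hb : (k == t.1) = false := by simp [hpk]
          have hpk' : ¬ t.1 = k := fun h => hpk h.symm
          simp [hb, pvRowStep, hpk']
      have hkeys : (pvStepT m t).keys = m.keys := by
        rw [hstep]; exact PySem.Dict.keys_insert_of_contains m _ hc
      have hnd' : (pvStepT m t).keys.Nodup := by rw [hkeys]; exact hnd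
      rw [ih _ hnd', hitems, hkeys, if_pos hmem, List.map_map]
      congr 1
      apply List.map_congr_left
      intro n hn
      have hne : ¬ t.1 = n := fun he => absurd (he ▸ hmem) (pvN1 ts m.keys n hn)
      simp [pvRowStep, hne]
    · -- fresh key
      have hcf : m.contains t.1 = false := by simpa using hc
      have hnmem : t.1 ∉ m.keys := fun h => by
        rw [(PySem.Dict.contains_iff_mem_keys m t.1).mpr h] at hcf; cases hcf
      have hsd : m.setdefault t.1 pyOffRow = m.insert t.1 pyOffRow :=
        PySem.Dict.setdefault_of_not_contains m _ hcf
      have hkeys1 : (m.insert t.1 pyOffRow).keys = m.keys ++ [t.1] :=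
        PySem.Dict.keys_insert_of_not_contains m _ hcf
      have hc1 : (m.insert t.1 pyOffRow).contains t.1 = true := by
        rw [PySem.Dict.contains_iff_mem_keys, hkeys1]; simp
      have hval : (m.insert t.1 pyOffRow).getD t.1 pyOffRow = pyOffRow := by
        simp [PySem.Dict.getD_insert_self]
      have hitems : (pvStepT m t).items
          = m.items.map (fun p => (p.1, pvRowStep p.1 p.2 t))
            ++ [(t.1, pvRowStep t.1 pyOffRow t)] := by
        simp only [pvStepT, hsd, PySem.Dict.modify, hval]
        rw [PySem.Dict.items_insert_of_contains _ _ hc1,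
            PySem.Dict.items_insert_of_not_contains m _ hcf]
        rw [List.map_append]
        congr 1
        · apply List.map_congr_left
          intro p hp
          obtain ⟨k, v⟩ := p
          have hpk : k ≠ t.1 := by
            intro he
            exact hnmem (he ▸ (List.mem_map_of_mem hp : (k, v).1 ∈ m.items.map Prod.fst))
          have hb : (k == t.1) = false := by simp [hpk]
          have hpk' : ¬ t.1 = k := fun h => hpk h.symm
          simp [hb, pvRowStep, hpk']
        · simp [pvRowStep]
      have hkeys : (pvStepT m t).keys = m.keys ++ [t.1] := by
        simp only [pvStepT, hsd, PySem.Dict.modify, hval]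
        rw [PySem.Dict.keys_insert_of_contains _ _ hc1, hkeys1]
      have hnd' : (pvStepT m t).keys.Nodup := by
        rw [hkeys]
        exact hnd.append (List.nodup_singleton _)
          (fun a ha hb => hnmem ((List.mem_singleton.mp hb) ▸ ha))
      rw [ih _ hnd', hitems, hkeys, if_neg hnmem]
      simp only [List.map_append, List.map_map, List.map_cons, List.map_nil,
        List.append_assoc, List.singleton_append]
      congr 2
      apply List.map_congr_left
      intro n hn
      have hne : ¬ t.1 = n := by
        intro he
        exact (pvN1 ts (m.keys ++ [t.1]) n hn)
          (he ▸ (List.mem_append_right _ (List.mem_singleton.mpr rfl)))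
      simp [pvRowStep, hne]


-- A's nested loops = fold over the flattened triples
lemma pvAF (roster : List (List (String × List String))) (s : Int) (m : PySem.Dict String (List String)) :
    (PySem.List.enumerate roster s).foldl (fun m p =>
        pySHIFTS.foldl (fun m shift =>
          ((PySem.Dict.mk p.2).getD shift []).foldl (fun m name =>
            (m.setdefault name pyOffRow).modify name pyOffRow
              (fun row => PySem.List.pySetD row p.1 (pySHIFT_CODE_MAP.getD shift ""))) m) m) m
      = (pvTri roster s).foldl pvStepT m := by
  induction roster generalizing s m with
  | nil => simp [pvTri, PySem.List.enumerate]
  | cons d r ih =>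
    rw [PySem.List.enumerate_cons, List.foldl_cons]
    rw [show pvTri (d :: r) s = pvSeg d s ++ pvTri r (s + 1) from rfl, List.foldl_append]
    rw [ih]
    congr 1
    show pySHIFTS.foldl _ m = _
    simp only [pySHIFTS, List.foldl_cons, List.foldl_nil, pvSeg, List.foldl_append]
    simp only [List.foldl_map]
    rfl


-- B's nested row loops = fold of pvRowStep over the flattened triples
lemma pvBF (roster : List (List (String × List String))) (s : Int) (n : String) (row : List String) :
    (PySem.List.enumerate roster s).foldl (fun row p =>
        pySHIFTS.foldl (fun row shift =>
          if n ∈ (PySem.Dict.mk p.2).getD shift []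
          then PySem.List.pySetD row p.1 (pySHIFT_CODE_MAP.getD shift "")
          else row) row) row
      = (pvTri roster s).foldl (pvRowStep n) row := by
  induction roster generalizing s row with
  | nil => simp [pvTri, PySem.List.enumerate]
  | cons d r ih =>
    rw [PySem.List.enumerate_cons, List.foldl_cons]
    rw [show pvTri (d :: r) s = pvSeg d s ++ pvTri r (s + 1) from rfl, List.foldl_append]
    rw [ih]
    congr 1
    simp only [pySHIFTS, List.foldl_cons, List.foldl_nil, pvSeg, List.foldl_append]
    rw [pvN3, pvN3, pvN3]
    rfl


-- B's order-gathering loops = fold of insert over the flattened triples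
lemma pvOF (roster : List (List (String × List String))) (s : Int) (od : PySem.Dict String Unit) :
    roster.foldl (fun od day =>
        pySHIFTS.foldl (fun od shift =>
          ((PySem.Dict.mk day).getD shift []).foldl (fun od name => od.insert name ()) od) od) od
      = (pvTri roster s).foldl (fun od t => od.insert t.1 ()) od := by
  induction roster generalizing s od with
  | nil => simp [pvTri]
  | cons d r ih =>
    rw [List.foldl_cons]
    rw [show pvTri (d :: r) s = pvSeg d s ++ pvTri r (s + 1) from rfl, List.foldl_append]
    rw [ih (s+1)]
    congr 1
    simp only [pySHIFTS, List.foldl_cons, List.foldl_nil, pvSeg, List.foldl_append]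
    simp only [List.foldl_map]


-- all values of the initial matrix are pyOffRow
lemma pvValOff (l : List String) (d : PySem.Dict String (List String))
    (h : ∀ p ∈ d.items, p.2 = pyOffRow) :
    ∀ p ∈ (l.foldl (fun m name => m.insert name pyOffRow) d).items, p.2 = pyOffRow := by
  induction l generalizing d with
  | nil => simpa using h
  | cons x l ih =>
    rw [List.foldl_cons]
    apply ih
    intro p hp
    rcases (PySem.Dict.mem_items_insert d x pyOffRow p).mp hp with h1 | h1
    · rw [h1]
    · exact h p h1.1


-- ===== VERDICT (by name: the statement is the Claim_ definition above) =====
theorem build_roster_matrix_py_spec : Claim_equal_build_roster_matrix_py := by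
  intro roster names _hdom _hpre
  unfold Spec_build_roster_matrix_py
  set m0 : PySem.Dict String (List String) :=
    names.foldl (fun m name => m.insert name pyOffRow) PySem.Dict.empty with hm0
  have km0 : m0.keys = PySem.Set.update [] names := by
    simpa using PySem.Dict.keys_foldl_insert names (fun _ _ => pyOffRow) PySem.Dict.empty
  have nodup0 : m0.keys.Nodup := by
    rw [km0]
    have := PySem.Dict.keys_foldl_insert (ν := List String) names (fun _ _ => pyOffRow) PySem.Dict.empty
    rw [← km0]
    exact PySem.Dict.nodup_keys_foldl_insert names (fun _ _ => pyOffRow) PySem.Dict.empty PySem.Dict.nodup_keys_empty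
  have items0 : m0.items = m0.keys.map (fun n => (n, pyOffRow)) := by
    rw [PySem.Dict.items_eq_map_keys m0 nodup0 pyOffRow]
    apply List.map_congr_left
    intro k hk
    obtain ⟨p, hp, hpk⟩ := List.mem_map.mp hk
    have hval : p.2 = pyOffRow := pvValOff names PySem.Dict.empty (by intro p hp; simp [PySem.Dict.empty] at hp) p hp
    have : (k, p.2) ∈ m0.items := by
      have : p = (k, p.2) := by rw [← hpk]
      rw [← this]; exact hp
    rw [PySem.Dict.getD_of_mem_items m0 this nodup0, hval]
  -- A side
  have hA : build_roster_matrix_py roster names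
      = ((pvTri roster 0).foldl pvStepT m0).items := by
    show ((PySem.List.enumerate roster 0).foldl _ m0).items = _
    rw [← pvAF roster 0 m0]
  rw [hA, pvL _ _ nodup0, items0, List.map_map]
  -- B side
  have hB : build_roster_matrix_py_alt roster names
      = (PySem.Set.update (PySem.Set.update ([] : List String) names) ((pvTri roster 0).map (·.1))).map
          (fun n => (n, (pvTri roster 0).foldl (pvRowStep n) pyOffRow)) := by
    set base : PySem.Dict String Unit :=
      names.foldl (fun od name => od.insert name ()) PySem.Dict.empty with hbase
    have kbase : base.keys = PySem.Set.update [] names := by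
      simpa using PySem.Dict.keys_foldl_insert names (fun _ _ => ()) PySem.Dict.empty
    have horder : (roster.foldl (fun od day =>
        pySHIFTS.foldl (fun od shift =>
          ((PySem.Dict.mk day).getD shift []).foldl (fun od name => od.insert name ()) od) od) base)
        = (pvTri roster 0).foldl (fun od t => od.insert t.1 ()) base := pvOF roster 0 base
    have korder : ((pvTri roster 0).foldl (fun od t => od.insert t.1 ()) base).keys
        = PySem.Set.update base.keys ((pvTri roster 0).map (·.1)) := by
      simpa using PySem.Dict.keys_foldl_insert_key (pvTri roster 0) (fun t => t.1) (fun _ _ => ()) base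
    have nodupb : base.keys.Nodup :=
      PySem.Dict.nodup_keys_foldl_insert names (fun _ _ => ()) PySem.Dict.empty PySem.Dict.nodup_keys_empty
    have nodupo : ((pvTri roster 0).foldl (fun od t => od.insert t.1 ()) base).keys.Nodup :=
      PySem.Dict.nodup_keys_foldl_insert_key (pvTri roster 0) (fun t => t.1) (fun _ _ => ()) base nodupb
    show (List.foldl _ (PySem.Dict.empty : PySem.Dict String (List String))
        ((roster.foldl (fun od day =>
          pySHIFTS.foldl (fun od shift =>
            ((PySem.Dict.mk day).getD shift []).foldl (fun od name => od.insert name ()) od) od) base)).keys).items = _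
    rw [horder]
    rw [show (List.foldl (fun res name =>
        res.insert name ((PySem.List.enumerate roster 0).foldl (fun row p =>
          pySHIFTS.foldl (fun row shift =>
            if name ∈ (PySem.Dict.mk p.2).getD shift []
            then PySem.List.pySetD row p.1 (pySHIFT_CODE_MAP.getD shift "")
            else row) row) pyOffRow))
        (PySem.Dict.empty : PySem.Dict String (List String))
        ((pvTri roster 0).foldl (fun od t => od.insert t.1 ()) base).keys).items
      = _ from PySem.Dict.items_foldl_insert_fresh _ (fun a => a) _ PySem.Dict.empty
          (fun a _ => PySem.Dict.contains_empty a)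
          (by simpa using nodupo)]
    rw [korder, kbase]
    apply List.map_congr_left
    intro n _
    rw [pvBF roster 0 n pyOffRow]
  rw [hB, km0, pvN2, List.map_append]
  rfl
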